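-- pv_equiv track=rewrite | github.com/DXWK73/signal_recover_diffusion | models/simple_net/nconvd_size_cal.py | get_1_dim_nconvd_size
-- ===== SOURCE A (Python) =====
-- def get_1_dim_nconvd_size(input_size, output_size):
--     def is_right(i, o, s, k, p):
--         # if (o+2*p-k)%s == 0:
--         return True if o == s*(i-1) - 2*p + k else False
--         # else:
--         #     return True if o == s*(i-1) - 2*p + k + (o+2*p-k)%s else False
--
--     ans = []
--     input_size = input_size[0]
--     output_size = output_size[0]
--     k_max = 10
--     s_max = 10
--     p_max = 1
--
--     for k in range(1, k_max+1):
--         for s in range(1, s_max+1):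
--             for p in range(0, p_max+1):
--                 if is_right(input_size, output_size, s, k, p):
--                     ans.append(f"k={k}, s={s}, p={p}")
--     return ans
-- ===== SOURCE B (Python) =====
-- def get_1_dim_nconvd_size(input_size, output_size):
--     i = input_size[0]
--     o = output_size[0]
--     # Solve o = s*(i-1) - 2*p + k for k over the 20 (s, p) pairs and
--     # bucket the matches by k, then emit buckets in k order.
--     buckets = {}
--     for s in range(1, 11):
--         for p in (0, 1):
--             k = o - s * (i - 1) + 2 * p
--             if 1 <= k <= 10:
--                 buckets.setdefault(k, []).append(f"k={k}, s={s}, p={p}")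
--     out = []
--     for k in range(1, 11):
--         out.extend(buckets.get(k, []))
--     return out
-- ===== Notes on version B (the rewrite author's own statement) =====
-- stated objective: alternative
-- what changed: Instead of brute-forcing all 200 (k,s,p) triples with the is_right test, B solves the output-size equation for k over the 20 (s,p) pairs, buckets the formatted matches by k in a dict, and concatenates the buckets in k order (a bucket sort replacing the exhaustive scan).
import Mathlib
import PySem

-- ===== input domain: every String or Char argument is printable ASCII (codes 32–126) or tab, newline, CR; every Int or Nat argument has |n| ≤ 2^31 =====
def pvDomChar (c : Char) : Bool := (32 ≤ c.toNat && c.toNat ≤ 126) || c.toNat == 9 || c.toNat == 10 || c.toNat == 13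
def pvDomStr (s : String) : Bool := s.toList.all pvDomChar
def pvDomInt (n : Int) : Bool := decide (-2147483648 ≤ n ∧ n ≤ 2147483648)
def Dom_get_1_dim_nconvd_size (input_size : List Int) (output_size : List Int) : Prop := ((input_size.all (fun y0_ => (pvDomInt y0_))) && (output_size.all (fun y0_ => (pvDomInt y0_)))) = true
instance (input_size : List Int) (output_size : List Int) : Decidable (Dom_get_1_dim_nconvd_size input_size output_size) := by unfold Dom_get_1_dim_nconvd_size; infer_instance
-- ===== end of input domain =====

-- B replaces A's brute-force scan of all 200 (k,s,p) triples by solving the size equation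
-- for k over the 20 (s,p) pairs and bucket-sorting the matches by k (objective: alternative).

-- ===== PORT A =====
-- one output line f"k={k}, s={s}, p={p}"
def pvLine (k s p : Int) : String :=
  "k=" ++ PySem.Int.toStr k ++ ", s=" ++ PySem.Int.toStr s ++ ", p=" ++ PySem.Int.toStr p

-- helper 'is_right' of A
def pvIsRight (i o s k p : Int) : Bool := o == s * (i - 1) - 2 * p + k

-- inner p-loop of A
def pvInnerA (i o k s : Int) (ans : List String) : List String :=
  (PySem.List.pyRange 0 2 1).foldl
    (fun ans p => if pvIsRight i o s k p then ans ++ [pvLine k s p] else ans) ans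

-- A's triple loop, after input_size = input_size[0]; output_size = output_size[0]
def pvA (i o : Int) : List String :=
  (PySem.List.pyRange 1 11 1).foldl
    (fun ans k => (PySem.List.pyRange 1 11 1).foldl (fun ans s => pvInnerA i o k s ans) ans) []

def get_1_dim_nconvd_size (input_size : List Int) (output_size : List Int) : List String :=
  -- input_size[0] / output_size[0]; Pre_ guarantees nonempty, so getD never takes the default
  pvA ((PySem.List.pyGet? input_size 0).getD 0) ((PySem.List.pyGet? output_size 0).getD 0)

-- ===== PORT B =====
-- B's first loop: the (k, line) matches, solving k = o - s*(i-1) + 2*p (the 'k = ...' binding is inlined)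
def pvMatches (i o : Int) : List (Int × String) :=
  (PySem.List.pyRange 1 11 1).foldl (fun acc s =>
    ([(0 : Int), 1]).foldl (fun acc p =>
      if 1 ≤ o - s * (i - 1) + 2 * p ∧ o - s * (i - 1) + 2 * p ≤ 10 then
        acc ++ [(o - s * (i - 1) + 2 * p, pvLine (o - s * (i - 1) + 2 * p) s p)]
      else acc) acc) []

-- B's body: group the matches into per-k buckets, then concatenate buckets for k = 1..10
-- B's grouping loop: buckets.setdefault(k, []).append(line) is Dict.modify k [] (· ++ [line])
def pvBuckets (i o : Int) : PySem.Dict Int (List String) :=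
  (pvMatches i o).foldl (fun d kl => PySem.Dict.modify d kl.1 [] (fun x => x ++ [kl.2])) PySem.Dict.empty

def pvB (i o : Int) : List String :=
  (PySem.List.pyRange 1 11 1).foldl (fun out k => out ++ PySem.Dict.getD (pvBuckets i o) k []) []

def get_1_dim_nconvd_size_alt (input_size : List Int) (output_size : List Int) : List String :=
  pvB ((PySem.List.pyGet? input_size 0).getD 0) ((PySem.List.pyGet? output_size 0).getD 0)

-- ===== PRECONDITION & SPEC =====
-- A (and B) index input_size[0] and output_size[0]: empty lists raise IndexError and are excluded.
def Pre_get_1_dim_nconvd_size (input_size : List Int) (output_size : List Int) : Prop :=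
  input_size ≠ [] ∧ output_size ≠ []
instance (input_size : List Int) (output_size : List Int) : Decidable (Pre_get_1_dim_nconvd_size input_size output_size) := by unfold Pre_get_1_dim_nconvd_size; infer_instance
def pvWitness_get_1_dim_nconvd_size : List Int × List Int := ([5], [9])
def Spec_get_1_dim_nconvd_size (input_size : List Int) (output_size : List Int) (out : List String) : Prop := out = get_1_dim_nconvd_size_alt input_size output_size
instance (input_size : List Int) (output_size : List Int) (out : List String) : Decidable (Spec_get_1_dim_nconvd_size input_size output_size out) := by unfold Spec_get_1_dim_nconvd_size; infer_instance

-- ===== CLAIM (what is proved, stated in full; the proofs are below) =====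
def Claim_equal_get_1_dim_nconvd_size : Prop := ∀ (input_size : List Int) (output_size : List Int), Dom_get_1_dim_nconvd_size input_size output_size → Pre_get_1_dim_nconvd_size input_size output_size → Spec_get_1_dim_nconvd_size input_size output_size (get_1_dim_nconvd_size input_size output_size)

-- ===== LEMMAS AND PROOFS =====

-- B's guarded match for one (s, p), filtered down to a fixed in-range k, is A's p-test for that k
theorem pvStep_eq (i o k s : Int) (hk1 : 1 ≤ k) (hk2 : k ≤ 10) :
    (((([(0 : Int), 1]).filter
        (fun p => decide (1 ≤ o - s * (i - 1) + 2 * p ∧ o - s * (i - 1) + 2 * p ≤ 10))).map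
        (fun p => (o - s * (i - 1) + 2 * p, pvLine (o - s * (i - 1) + 2 * p) s p))).filter
        (fun q => q.1 == k)).map (fun q => q.2)
    = (([(0 : Int), 1]).filter (fun p => pvIsRight i o s k p)).map (fun p => pvLine k s p) := by
  rw [List.filter_map, List.filter_filter, List.map_map]
  have hf : ∀ p ∈ [(0 : Int), 1],
      (((fun q : Int × String => q.1 == k) ∘
          (fun p => (o - s * (i - 1) + 2 * p, pvLine (o - s * (i - 1) + 2 * p) s p))) p &&
        decide (1 ≤ o - s * (i - 1) + 2 * p ∧ o - s * (i - 1) + 2 * p ≤ 10))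
      = pvIsRight i o s k p := by
    intro p _
    by_cases hpe : o - s * (i - 1) + 2 * p = k
    · have h1 : ((o - s * (i - 1) + 2 * p) == k) = true := beq_iff_eq.mpr hpe
      have h2 : (decide (1 ≤ o - s * (i - 1) + 2 * p ∧ o - s * (i - 1) + 2 * p ≤ 10)) = true :=
        decide_eq_true (by omega)
      have h3 : pvIsRight i o s k p = true := by
        simp only [pvIsRight, beq_iff_eq]; omega
      simp only [Function.comp_apply, h1, h2, h3, Bool.and_self]
    · have h1 : ((o - s * (i - 1) + 2 * p) == k) = false := by
        simp only [beq_eq_false_iff_ne, ne_eq]; exact hpe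
      have h3 : pvIsRight i o s k p = false := by
        simp only [pvIsRight, beq_eq_false_iff_ne, ne_eq]; omega
      simp only [Function.comp_apply, h1, h3, Bool.false_and]
  rw [List.filter_congr hf]
  refine List.map_congr_left (fun p hp => ?_)
  have hpe : o - s * (i - 1) + 2 * p = k := by
    have := List.of_mem_filter hp
    simp only [pvIsRight, beq_iff_eq] at this
    omega
  rw [Function.comp_apply, hpe]

-- the same, summed over the list of s values
theorem pvFlat_eq (i o k : Int) (hk1 : 1 ≤ k) (hk2 : k ≤ 10) (ss : List Int) :
    (((ss.flatMap (fun s => (([(0 : Int), 1]).filter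
        (fun p => decide (1 ≤ o - s * (i - 1) + 2 * p ∧ o - s * (i - 1) + 2 * p ≤ 10))).map
        (fun p => (o - s * (i - 1) + 2 * p, pvLine (o - s * (i - 1) + 2 * p) s p)))).filter
        (fun q => q.1 == k)).map (fun q => q.2))
    = ss.flatMap (fun s => (([(0 : Int), 1]).filter (fun p => pvIsRight i o s k p)).map
        (fun p => pvLine k s p)) := by
  induction ss with
  | nil => rfl
  | cons s ss ih =>
    simp only [List.flatMap_cons, List.filter_append, List.map_append, ih,
      pvStep_eq i o k s hk1 hk2]

-- A's two inner loops, reshaped: for each k, append the lines of the matching (s, p) pairs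
theorem pvA_shape (i o : Int) :
    pvA i o = (PySem.List.pyRange 1 11 1).foldl (fun ans k =>
      ans ++ (PySem.List.pyRange 1 11 1).flatMap (fun s =>
        (([(0 : Int), 1]).filter (fun p => pvIsRight i o s k p)).map (fun p => pvLine k s p))) [] := by
  have hp2 : PySem.List.pyRange 0 2 1 = [(0 : Int), 1] := by decide
  unfold pvA
  refine PySem.List.foldl_congr_mem _ _ _ _ (fun acc k _ => ?_)
  have h1 : ∀ (acc : List String) (s : Int), s ∈ PySem.List.pyRange 1 11 1 →
      pvInnerA i o k s acc
      = acc ++ (([(0 : Int), 1]).filter (fun p => pvIsRight i o s k p)).map (fun p => pvLine k s p) := by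
    intro acc s _
    unfold pvInnerA
    rw [hp2, PySem.List.foldl_append_if]
  rw [PySem.List.foldl_congr_mem _ _ _ _ h1, PySem.List.foldl_append_eq_flatMap]

-- B's match loop, reshaped as a flatMap over s
theorem pvMatches_shape (i o : Int) :
    pvMatches i o = (PySem.List.pyRange 1 11 1).flatMap (fun s =>
      (([(0 : Int), 1]).filter
        (fun p => decide (1 ≤ o - s * (i - 1) + 2 * p ∧ o - s * (i - 1) + 2 * p ≤ 10))).map
        (fun p => (o - s * (i - 1) + 2 * p, pvLine (o - s * (i - 1) + 2 * p) s p))) := by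
  unfold pvMatches
  have h1 : ∀ (acc : List (Int × String)) (s : Int), s ∈ PySem.List.pyRange 1 11 1 →
      ([(0 : Int), 1]).foldl (fun acc p =>
        if 1 ≤ o - s * (i - 1) + 2 * p ∧ o - s * (i - 1) + 2 * p ≤ 10 then
          acc ++ [(o - s * (i - 1) + 2 * p, pvLine (o - s * (i - 1) + 2 * p) s p)]
        else acc) acc
      = acc ++ (([(0 : Int), 1]).filter
          (fun p => decide (1 ≤ o - s * (i - 1) + 2 * p ∧ o - s * (i - 1) + 2 * p ≤ 10))).map
          (fun p => (o - s * (i - 1) + 2 * p, pvLine (o - s * (i - 1) + 2 * p) s p)) := by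
    intro acc s _
    rw [PySem.List.foldl_append_ite]
  rw [PySem.List.foldl_congr_mem _ _ _ _ h1, PySem.List.foldl_append_eq_flatMap,
    List.nil_append]

-- the two programs agree for every pair of scalars
theorem pvA_eq_pvB (i o : Int) : pvA i o = pvB i o := by
  rw [pvA_shape]
  unfold pvB
  refine PySem.List.foldl_congr_mem _ _ _ _ (fun acc k hk => ?_)
  have hk' : 1 ≤ k ∧ k < 11 := (PySem.List.mem_pyRange_one).mp hk
  have hb : PySem.Dict.getD (pvBuckets i o) k []
      = (PySem.List.pyRange 1 11 1).flatMap (fun s =>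
          (([(0 : Int), 1]).filter (fun p => pvIsRight i o s k p)).map (fun p => pvLine k s p)) := by
    unfold pvBuckets
    rw [PySem.Dict.getD_foldl_modify_append, pvMatches_shape,
      pvFlat_eq i o k hk'.1 (by omega) _]
    simp
  rw [hb]

-- ===== VERDICT (by name: the statement is the Claim_ definition above) =====
theorem get_1_dim_nconvd_size_spec : Claim_equal_get_1_dim_nconvd_size := by
  intro input_size output_size _ _
  unfold Spec_get_1_dim_nconvd_size get_1_dim_nconvd_size get_1_dim_nconvd_size_alt
  exact pvA_eq_pvB _ _
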